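-- pv_equiv track=rewrite | github.com/Mechatronics-SDSU/robosub-2022-software | src/gui/main.py | request_to_value
-- ===== SOURCE A (Python) =====
-- def request_to_value(r: any) -> str:
--     """Converts grpc responses into strings, stripping quotes.
--     """
--     first = -1
--     result = ''
--     for i in range(len(r)):
--         if r[i] == '\"' and first == -1:
--             first = i
--         elif r[i] == '\"' and first != -1:
--             result = r[first+1:i]
--     return result
-- ===== SOURCE B (Python) =====
-- def request_to_value(r: any) -> str:
--     """Converts grpc responses into strings, stripping quotes."""
--     parts = r.split('"')
--     return '"'.join(parts[1:-1])
-- ===== Notes on version B (the rewrite author's own statement) =====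
-- stated objective: idiomatic
-- what changed: Replaces A's index-tracking scan (first-quote index plus a fresh re-slice at every later quote) with a split on the quote character and a join of the fragments strictly between the first and last quote.
import Mathlib
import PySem

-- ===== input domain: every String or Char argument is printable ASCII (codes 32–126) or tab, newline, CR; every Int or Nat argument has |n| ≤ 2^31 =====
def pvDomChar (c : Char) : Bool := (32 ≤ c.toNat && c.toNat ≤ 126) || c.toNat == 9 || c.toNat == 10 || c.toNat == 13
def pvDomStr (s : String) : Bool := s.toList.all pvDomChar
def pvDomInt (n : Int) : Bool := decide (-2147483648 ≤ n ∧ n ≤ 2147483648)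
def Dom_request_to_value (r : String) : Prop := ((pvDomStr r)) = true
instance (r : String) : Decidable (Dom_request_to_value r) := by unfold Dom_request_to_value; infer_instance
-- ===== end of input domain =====

-- B replaces A's index-tracking scan (first-quote index + a re-slice at every later quote)
-- with an idiomatic split on '"' and a join of the fragments between the first and last quote.


-- ===== PORT A =====
-- loop body of A: state (first, result); r[i] read with pyGetD (i is always in range in the loop)
def rtvStep (l : List Char) (st : Int × List Char) (i : Int) : Int × List Char :=
  if PySem.List.pyGetD l i ' ' = '\"' ∧ st.1 = -1 then (i, st.2)
  else if PySem.List.pyGetD l i ' ' = '\"' ∧ st.1 ≠ -1 then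
    (st.1, PySem.List.slice l (some (st.1 + 1)) (some i))
  else st

def request_to_value (r : String) : String :=
  String.ofList (((PySem.List.pyRange 0 (PySem.Str.len r) 1).foldl (rtvStep r.toList) (-1, [])).2)

-- ===== PORT B =====
def request_to_value_alt (r : String) : String :=
  let parts := (PySem.Str.split? r "\"").getD []
  PySem.Str.join "\"" (PySem.List.slice parts (some 1) (some (-1)))

-- ===== PRECONDITION & SPEC =====
def Spec_request_to_value (r : String) (out : String) : Prop := out = request_to_value_alt r
instance (r : String) (out : String) : Decidable (Spec_request_to_value r out) := by unfold Spec_request_to_value; infer_instance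

-- ===== CLAIM (what is proved, stated in full; the proofs are below) =====
def Claim_equal_request_to_value : Prop := ∀ (r : String), Dom_request_to_value r → Spec_request_to_value r (request_to_value r)

-- ===== LEMMAS AND PROOFS =====

theorem rtv_go_singleton (c : Char) (fuel : Nat) (l cur : List Char) (acc : List (List Char))
    (h : l.length < fuel) :
    PySem.Chars.splitOn.go [c] fuel l cur acc =
      acc.reverse ++ List.modifyHead (cur.reverse ++ ·) (List.splitOn c l) := by
  induction l generalizing fuel cur acc with
  | nil =>
    cases fuel with
    | zero => omega
    | succ f => simp [PySem.Chars.splitOn.go, List.splitOn, List.splitOnP_nil]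
  | cons a rest ih =>
    cases fuel with
    | zero => omega
    | succ f =>
      rw [PySem.Chars.splitOn.go]
      by_cases hac : a = c
      · subst hac
        simp only [List.isPrefixOf, beq_self_eq_true, Bool.true_and, if_pos,
          List.length_cons, List.drop_succ_cons, List.length_nil, List.drop_zero]
        rw [ih f [] (cur.reverse :: acc) (by simpa using h)]
        simp [List.splitOn, List.splitOnP_cons]
        cases List.splitOnP (fun x => x == a) rest <;> simp
      · have hpre : [c].isPrefixOf (a :: rest) = false := by
          simp [List.isPrefixOf]; exact fun hca => absurd hca.symm hac
        rw [hpre]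
        simp only [if_neg Bool.false_ne_true]
        rw [ih f (a :: cur) acc (by simpa using h)]
        simp only [List.splitOn, List.splitOnP_cons, beq_iff_eq, if_neg hac,
          List.modifyHead_modifyHead]
        congr 1
        cases hsp : List.splitOnP (fun x => x == c) rest with
        | nil => simp
        | cons b bs => simp

theorem rtv_chars_splitOn_singleton (c : Char) (s : List Char) :
    PySem.Chars.splitOn s [c] = List.splitOn c s := by
  rw [PySem.Chars.splitOn, rtv_go_singleton c (s.length + 1) s [] [] (by omega)]
  cases List.splitOn c s <;> simp

theorem rtv_splitOn_of_not_mem (c : Char) (l : List Char) (h : c ∉ l) :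
    List.splitOn c l = [l] := by
  induction l with
  | nil => simp
  | cons a rest ih =>
    simp only [List.mem_cons, not_or] at h
    simp [List.splitOn, List.splitOnP_cons]
    rw [show List.splitOnP (fun x => x == c) rest = List.splitOn c rest from rfl, ih h.2]
    simp [Ne.symm h.1]

theorem rtv_splitOn_ne_nil (c : Char) (l : List Char) : List.splitOn c l ≠ [] := by
  induction l with
  | nil => simp
  | cons a rest ih =>
    simp only [List.splitOn, List.splitOnP_cons]
    split
    · simp
    · intro hmod
      exact ih (by simpa [List.splitOn] using List.modifyHead_eq_nil_iff.mp hmod)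

theorem rtv_splitOn_append_cons (c : Char) (p t : List Char) (h : c ∉ p) :
    List.splitOn c (p ++ c :: t) = p :: List.splitOn c t := by
  induction p with
  | nil => simp [List.splitOn, List.splitOnP_cons]
  | cons a p' ih =>
    simp only [List.mem_cons, not_or] at h
    simp only [List.cons_append, List.splitOn, List.splitOnP_cons, beq_iff_eq]
    rw [show List.splitOnP (fun x => x == c) (p' ++ c :: t) = List.splitOn c (p' ++ c :: t) from rfl,
      ih h.2]
    rw [if_neg (fun hh => h.1 hh.symm)]
    rfl

theorem rtv_splitOn_append_last (c : Char) (m s : List Char) (h : c ∉ s) :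
    List.splitOn c (m ++ c :: s) = List.splitOn c m ++ [s] := by
  induction m with
  | nil =>
    simp only [List.nil_append, List.splitOn, List.splitOnP_cons, beq_self_eq_true, if_pos]
    rw [show List.splitOnP (fun x => x == c) s = List.splitOn c s from rfl,
      rtv_splitOn_of_not_mem c s h]
    rfl
  | cons a m' ih =>
    by_cases hac : a = c
    · subst hac
      simp only [List.cons_append, List.splitOn, List.splitOnP_cons, beq_self_eq_true, if_pos]
      rw [show List.splitOnP (fun x => x == a) (m' ++ a :: s) = List.splitOn a (m' ++ a :: s) from rfl, ih]
      rfl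
    · simp only [List.cons_append, List.splitOn, List.splitOnP_cons, beq_iff_eq, if_neg hac]
      rw [show List.splitOnP (fun x => x == c) (m' ++ c :: s) = List.splitOn c (m' ++ c :: s) from rfl, ih,
        show List.splitOnP (fun x => x == c) m' = List.splitOn c m' from rfl]
      have hne := rtv_splitOn_ne_nil c m'
      cases hsp : List.splitOn c m' with
      | nil => exact absurd hsp hne
      | cons b bs => simp

theorem rtv_slice_one_neg_one {α : Type} (xs : List α) :
    PySem.List.slice xs (some 1) (some (-1)) = xs.tail.dropLast := by
  cases xs with
  | nil => rfl
  | cons a t =>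
    simp only [PySem.List.slice, PySem.List.clampIdx, List.dropLast_eq_take, List.tail_cons]
    norm_num
    split
    · omega
    · omega

def rtvStep2 (l : List Char) (st : Int × List Char) (p : Int × Char) : Int × List Char :=
  if p.2 = '"' ∧ st.1 = -1 then (p.1, st.2)
  else if p.2 = '"' ∧ st.1 ≠ -1 then (st.1, PySem.List.slice l (some (st.1 + 1)) (some p.1))
  else st

theorem rtv_fold_no_quote (l seg : List Char) (hq : '"' ∉ seg) :
    ∀ (k : Int) (st : Int × List Char), (PySem.List.enumerate seg k).foldl (rtvStep2 l) st = st := by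
  induction seg with
  | nil => intro k st; simp [PySem.List.enumerate_nil]
  | cons a rest ih =>
    intro k st
    simp only [List.mem_cons, not_or] at hq
    rw [PySem.List.enumerate_cons, List.foldl_cons]
    rw [show rtvStep2 l st (k, a) = st by simp [rtvStep2, Ne.symm hq.1]]
    exact ih hq.2 (k + 1) st

theorem rtv_fold_fst (l seg : List Char) :
    ∀ (k f : Int) (res : List Char), f ≠ -1 →
      ∃ res', (PySem.List.enumerate seg k).foldl (rtvStep2 l) (f, res) = (f, res') := by
  induction seg with
  | nil => intro k f res _; exact ⟨res, by simp [PySem.List.enumerate_nil]⟩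
  | cons a rest ih =>
    intro k f res hf
    rw [PySem.List.enumerate_cons, List.foldl_cons]
    by_cases ha : a = '"'
    · rw [show rtvStep2 l (f, res) (k, a) = (f, PySem.List.slice l (some (f + 1)) (some k)) by
        simp [rtvStep2, ha, hf]]
      exact ih (k + 1) f _ hf
    · rw [show rtvStep2 l (f, res) (k, a) = (f, res) by simp [rtvStep2, ha]]
      exact ih (k + 1) f res hf

theorem rtv_fold_last (l m s : List Char) (hs : '"' ∉ s) (k f : Int) (res : List Char)
    (hf : f ≠ -1) :
    (PySem.List.enumerate (m ++ '"' :: s) k).foldl (rtvStep2 l) (f, res) =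
      (f, PySem.List.slice l (some (f + 1)) (some (k + m.length))) := by
  rw [PySem.List.enumerate_append, List.foldl_append]
  obtain ⟨res', hres'⟩ := rtv_fold_fst l m k f res hf
  rw [hres', PySem.List.enumerate_cons, List.foldl_cons]
  rw [show rtvStep2 l (f, res') (k + ↑m.length, '"') =
      (f, PySem.List.slice l (some (f + 1)) (some (k + m.length))) by simp [rtvStep2, hf]]
  exact rtv_fold_no_quote l s hs _ _

theorem rtv_exists_first (c : Char) (l : List Char) (h : c ∈ l) :
    ∃ p t, l = p ++ c :: t ∧ c ∉ p := by
  induction l with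
  | nil => simp at h
  | cons a rest ih =>
    by_cases hac : a = c
    · exact ⟨[], rest, by simp [hac], by simp⟩
    · obtain ⟨p, t, hpt, hcp⟩ := ih (by simpa [Ne.symm hac] using h)
      exact ⟨a :: p, t, by simp [hpt], by simp only [List.mem_cons, not_or]; exact ⟨fun hh => hac hh.symm, hcp⟩⟩

theorem rtv_fold_eq_enum (l : List Char) (st : Int × List Char) :
    (PySem.List.pyRange 0 (PySem.List.len l) 1).foldl (rtvStep l) st =
      (PySem.List.enumerate l 0).foldl (rtvStep2 l) st := by
  rw [PySem.List.enumerate_eq_map_pyRange l ' ', List.foldl_map]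
  rfl

theorem rtv_alt_toList (r : String) :
    (request_to_value_alt r).toList =
      List.intercalate ['"'] ((List.splitOn '"' r.toList).tail.dropLast) := by
  have hmap := PySem.Str.split?_map r "\""
  have hsep : ("\"" : String).toList = ['"'] := rfl
  rw [hsep] at hmap
  rw [show PySem.Chars.split? r.toList ['"'] = some (PySem.Chars.splitOn r.toList ['"']) by
    simp [PySem.Chars.split?]] at hmap
  obtain ⟨parts0, hp0, hp0map⟩ := Option.map_eq_some_iff.mp hmap
  rw [request_to_value_alt]
  simp only [hp0, Option.getD_some]
  rw [PySem.Str.toList_join, hsep, rtv_slice_one_neg_one, List.map_dropLast, List.map_tail,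
    hp0map, rtv_chars_splitOn_singleton]
  rfl

theorem request_to_value_spec' (r : String) : request_to_value r = request_to_value_alt r := by
  apply String.toList_inj.mp
  rw [rtv_alt_toList]
  rw [request_to_value, String.toList_ofList]
  rw [show PySem.Str.len r = PySem.List.len r.toList from rfl, rtv_fold_eq_enum]
  by_cases hq : '"' ∈ r.toList
  · obtain ⟨p, t, hl, hcp⟩ := rtv_exists_first '"' r.toList hq
    rw [hl] at *
    rw [PySem.List.enumerate_append, List.foldl_append, rtv_fold_no_quote _ p hcp,
      PySem.List.enumerate_cons, List.foldl_cons]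
    rw [show rtvStep2 (p ++ '"' :: t) ((-1 : Int), ([] : List Char)) (0 + ↑p.length, '"') =
        (0 + (p.length : Int), []) by simp [rtvStep2]]
    by_cases ht : '"' ∈ t
    · have : '"' ∈ t.reverse := by simpa using ht
      obtain ⟨p', t', hrev, hcp'⟩ := rtv_exists_first '"' t.reverse this
      have hts : t = t'.reverse ++ '"' :: p'.reverse := by
        have := congrArg List.reverse hrev
        simpa using this
      have hs : '"' ∉ p'.reverse := by simpa using hcp'
      rw [hts] at *
      rw [rtv_fold_last _ _ _ hs _ _ _ (by omega)]
      -- A's slice equals the middle fragment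
      have hA : PySem.List.slice (p ++ '"' :: (t'.reverse ++ '"' :: p'.reverse))
          (some (0 + (p.length : Int) + 1)) (some (0 + (p.length : Int) + 1 + t'.reverse.length)) =
          t'.reverse := by
        have h1 : (0 + (p.length : Int) + 1) = ((p.length + 1 : Nat) : Int) := by push_cast; ring
        have h2 : (0 + (p.length : Int) + 1 + t'.reverse.length) =
            ((p.length + 1 : Nat) : Int) + ((t'.reverse.length : Nat) : Int) := by push_cast; ring
        rw [h2, h1, PySem.List.slice_natCast_add]
        rw [show p ++ '"' :: (t'.reverse ++ '"' :: p'.reverse) =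
            (p ++ ['"']) ++ (t'.reverse ++ '"' :: p'.reverse) by simp]
        rw [show p.length + 1 = (p ++ ['"']).length by simp]
        rw [List.drop_left, List.take_left']
        rfl
      rw [hA]
      -- B's side
      rw [rtv_splitOn_append_cons _ _ _ hcp, rtv_splitOn_append_last _ _ _ hs]
      simp only [List.tail_cons, List.dropLast_concat]
      exact (List.intercalate_splitOn t'.reverse '"').symm
    · rw [rtv_fold_no_quote _ t ht]
      rw [rtv_splitOn_append_cons _ _ _ hcp, rtv_splitOn_of_not_mem _ t ht]
      simp [List.intercalate]
  · rw [rtv_fold_no_quote _ _ hq, rtv_splitOn_of_not_mem _ _ hq]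
    simp [List.intercalate]


-- ===== VERDICT (by name: the statement is the Claim_ definition above) =====
theorem request_to_value_spec : Claim_equal_request_to_value := by
  intro r _
  exact request_to_value_spec' r
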